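-- pv_equiv track=rewrite | github.com/heymitch/sifu | src/sifu/compiler/sop.py | _split_at_boundaries
-- ===== SOURCE A (Python) =====
-- def _split_at_boundaries(events, max_size: int) -> list[list]:
--     """Split events into chunks, preferring app_switch boundaries.
--
--     Tries to split at app_switch events near the max_size boundary
--     so chunks align with natural workflow transitions.
--     """
--     if len(events) <= max_size:
--         return [list(events)]
--
--     chunks = []
--     start = 0
--
--     while start < len(events):
--         end = min(start + max_size, len(events))
--
--         if end < len(events):
--             # Look for an app_switch near the boundary to split cleanly
--             best_split = end
--             for j in range(end, max(start + max_size // 2, start), -1):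
--                 try:
--                     if events[j]["type"] == "app_switch":
--                         best_split = j
--                         break
--                 except (KeyError, IndexError):
--                     continue
--             end = best_split
--
--         chunks.append(list(events[start:end]))
--         start = end
--
--     return chunks
-- ===== SOURCE B (Python) =====
-- def _split_at_boundaries(events, max_size: int) -> list[list]:
--     """Split events into chunks, preferring app_switch boundaries.
--
--     Staged: first index all app_switch positions, then compute the list of
--     cut points, finally slice the events between consecutive cut points.
--     """
--     if len(events) <= max_size:
--         return [list(events)]
--
--     n = len(events)
--     switches = [i for i, e in enumerate(events) if e.get("type") == "app_switch"]
--
--     cuts = [0]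
--     while cuts[-1] < n:
--         start = cuts[-1]
--         end = min(start + max_size, n)
--         if end < n:
--             lo = max(start + max_size // 2, start)
--             best = end
--             for j in switches:
--                 if lo < j <= end:
--                     best = j
--             end = best
--         cuts.append(end)
--
--     return [list(events[a:b]) for a, b in zip(cuts, cuts[1:])]
-- ===== Notes on version B (the rewrite author's own statement) =====
-- stated objective: alternative
-- what changed: B works in three stages: it builds an index of app_switch positions in one forward pass, then computes only the list of cut points (each step taking the last indexed switch inside its window instead of A's backward try/except scan over the raw events), and finally slices the events between consecutive cut points.
import Mathlib
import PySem

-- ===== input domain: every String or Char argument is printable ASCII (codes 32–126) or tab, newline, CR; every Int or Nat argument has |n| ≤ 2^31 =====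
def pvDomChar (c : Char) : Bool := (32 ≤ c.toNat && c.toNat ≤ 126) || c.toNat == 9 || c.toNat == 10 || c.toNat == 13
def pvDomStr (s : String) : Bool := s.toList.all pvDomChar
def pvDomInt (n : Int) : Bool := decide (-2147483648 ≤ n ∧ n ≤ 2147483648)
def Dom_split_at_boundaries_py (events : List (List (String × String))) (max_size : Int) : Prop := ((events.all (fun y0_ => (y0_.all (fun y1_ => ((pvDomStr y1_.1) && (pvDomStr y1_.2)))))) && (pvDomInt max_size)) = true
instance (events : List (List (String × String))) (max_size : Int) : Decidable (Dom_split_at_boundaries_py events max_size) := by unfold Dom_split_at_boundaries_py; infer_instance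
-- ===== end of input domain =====

-- B replaces A's inline backward scan by three stages: an index of app_switch positions,
-- a cut-point list, and a final slicing pass between consecutive cut points (objective: alternative).


-- ===== PORT A =====
-- dict lookup e["type"] on the association-list representation
def pvTypeOf (e : List (String × String)) : Option String := PySem.Dict.get? ⟨e⟩ "type"

-- the backward 'for j in range(end, max(start + max_size // 2, start), -1)' scan,
-- with the try/except (KeyError, IndexError): continue
def pvScanA (events : List (List (String × String))) : List Int → Int → Int
  | [], d => d
  | j :: rest, d =>
    match PySem.List.pyGet? events j with
    | none => pvScanA events rest d            -- IndexError: continue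
    | some e =>
      match pvTypeOf e with
      | none => pvScanA events rest d          -- KeyError: continue
      | some v => if v = "app_switch" then j else pvScanA events rest d

-- the 'while start < len(events)' loop (fuel makes it total; under Pre_ the fuel suffices)
def pvLoopA (events : List (List (String × String))) (max_size : Int) :
    Nat → Int → List (List (List (String × String))) → List (List (List (String × String)))
  | 0, _, chunks => chunks
  | fuel + 1, start, chunks =>
    if start < (events.length : Int) then
      let end0 := min (start + max_size) (events.length : Int)
      let end1 :=
        if end0 < (events.length : Int) then
          pvScanA events
            (PySem.List.pyRange end0 (max (start + PySem.Int.floordiv max_size 2) start) (-1)) end0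
        else end0
      pvLoopA events max_size fuel end1 (chunks ++ [PySem.List.slice events (some start) (some end1)])
    else chunks

def split_at_boundaries_py (events : List (List (String × String))) (max_size : Int) : List (List (List (String × String))) :=
  if (events.length : Int) ≤ max_size then [events]
  else pvLoopA events max_size (events.length + 1) 0 []

-- ===== PORT B =====
-- switches = [i for i, e in enumerate(events) if e.get("type") == "app_switch"]
def pvSwitches (events : List (List (String × String))) : List Int :=
  ((PySem.List.enumerate events).filter
    (fun p => PySem.Dict.get? ⟨p.2⟩ "type" == some "app_switch")).map (·.1)

-- 'best = end; for j in switches: if lo < j <= end: best = j'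
def pvBestB (switches : List Int) (lo e : Int) : Int :=
  switches.foldl (fun best j => if lo < j ∧ j ≤ e then j else best) e

-- the cut points produced after 'start' (fuel makes it total; under Pre_ the fuel suffices)
def pvCuts (events : List (List (String × String))) (max_size : Int) (switches : List Int) :
    Nat → Int → List Int
  | 0, _ => []
  | fuel + 1, start =>
    if start < (events.length : Int) then
      let end0 := min (start + max_size) (events.length : Int)
      let end1 :=
        if end0 < (events.length : Int) then
          pvBestB switches (max (start + PySem.Int.floordiv max_size 2) start) end0
        else end0
      end1 :: pvCuts events max_size switches fuel end1
    else []

def split_at_boundaries_py_alt (events : List (List (String × String))) (max_size : Int) : List (List (List (String × String))) :=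
  if (events.length : Int) ≤ max_size then [events]
  else
    let cs := pvCuts events max_size (pvSwitches events) (events.length + 1) 0
    ((((0 : Int) :: cs).zip cs).map (fun p => PySem.List.slice events (some p.1) (some p.2)))

-- ===== PRECONDITION & SPEC =====
-- Pre_ excludes only inputs on which A never returns: with a nonempty events list and
-- max_size ≤ 0 the while loop cannot advance 'start' and A loops forever.
def Pre_split_at_boundaries_py (events : List (List (String × String))) (max_size : Int) : Prop :=
  events = [] ∨ 1 ≤ max_size
instance (events : List (List (String × String))) (max_size : Int) : Decidable (Pre_split_at_boundaries_py events max_size) := by unfold Pre_split_at_boundaries_py; infer_instance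

def pvWitness_split_at_boundaries_py : (List (List (String × String))) × Int :=
  ([[("type", "app_switch")], [("type", "click")], [("x", "y")]], 2)

def Spec_split_at_boundaries_py (events : List (List (String × String))) (max_size : Int) (out : List (List (List (String × String)))) : Prop := out = split_at_boundaries_py_alt events max_size
instance (events : List (List (String × String))) (max_size : Int) (out : List (List (List (String × String)))) : Decidable (Spec_split_at_boundaries_py events max_size out) := by unfold Spec_split_at_boundaries_py; infer_instance

-- ===== CLAIM (what is proved, stated in full; the proofs are below) =====
def Claim_equal_split_at_boundaries_py : Prop := ∀ (events : List (List (String × String))) (max_size : Int), Dom_split_at_boundaries_py events max_size → Pre_split_at_boundaries_py events max_size → Spec_split_at_boundaries_py events max_size (split_at_boundaries_py events max_size)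

-- ===== LEMMAS AND PROOFS =====

-- membership in the switch index: exactly the in-range indices whose dict maps "type" to "app_switch"
theorem pv_mem_switches (events : List (List (String × String))) (j : Int) :
    j ∈ pvSwitches events ↔
      ∃ (k : Nat) (h : k < events.length),
        j = (k : Int) ∧ pvTypeOf events[k] = some "app_switch" := by
  unfold pvSwitches pvTypeOf
  simp only [List.mem_map, List.mem_filter, PySem.List.mem_enumerate_iff]
  constructor
  · rintro ⟨p, ⟨⟨k, hk, rfl⟩, hp⟩, rfl⟩
    exact ⟨k, hk, by simp, by simpa using hp⟩
  · rintro ⟨k, hk, rfl, hsw⟩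
    exact ⟨((k : Int), events[k]), ⟨⟨k, hk, by simp⟩, by simpa using hsw⟩, rfl⟩

-- the switch index is strictly increasing
theorem pv_switches_sorted (events : List (List (String × String))) :
    (pvSwitches events).Pairwise (· < ·) := by
  unfold pvSwitches
  rw [List.pairwise_map]
  exact (PySem.List.pairwise_lt_enumerate events 0).filter _

-- last element of a filtered sorted list, when e satisfies the predicate and bounds it
theorem pv_getLast_filter (p : Int → Bool) :
    ∀ (sw : List Int), sw.Pairwise (· < ·) → ∀ e, e ∈ sw → p e = true →
      (∀ j, p j = true → j ≤ e) → (sw.filter p).getLast? = some e := by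
  intro sw
  induction sw with
  | nil => intro _ e he; exact absurd he (List.not_mem_nil)
  | cons x t ih =>
    intro hpw e he hpe hbd
    have hxt := (List.pairwise_cons.mp hpw).1
    have htpw := (List.pairwise_cons.mp hpw).2
    rcases List.mem_cons.mp he with rfl | het
    · have hnil : t.filter p = [] := by
        rw [List.filter_eq_nil_iff]
        intro y hy hpy
        exact absurd (hbd y hpy) (not_le.mpr (hxt y hy))
      simp [hpe, hnil]
    · have hlast : (t.filter p).getLast? = some e := ih htpw e het hpe hbd
      have hne : t.filter p ≠ [] := by intro h; rw [h] at hlast; simp at hlast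
      rw [List.filter_cons]
      rcases htf : t.filter p with _ | ⟨y, l⟩
      · exact absurd htf hne
      · rw [htf] at hlast
        split
        · rw [List.getLast?_cons_cons, hlast]
        · exact hlast

-- B's forward fold keeps the LAST element satisfying the predicate (or the default)
theorem pv_foldl_pick (p : Int → Prop) [DecidablePred p] :
    ∀ (sw : List Int) (d : Int),
      sw.foldl (fun best j => if p j then j else best) d
        = ((sw.filter (fun j => decide (p j))).getLast?).getD d := by
  intro sw
  induction sw with
  | nil => intro d; rfl
  | cons x t ih =>
    intro d
    rw [List.foldl_cons, ih, List.filter_cons]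
    by_cases hx : p x
    · simp only [hx, if_true, decide_true]
      rcases htf : t.filter (fun j => decide (p j)) with _ | ⟨y, l⟩
      · simp
      · rcases hgl : (y :: l).getLast? with _ | z
        · simp at hgl
        · simp [List.getLast?_cons_cons, hgl]
    · simp [hx]

-- A's backward scan equals B's "last indexed switch in the window, else the default"
theorem pv_scan_eq (events : List (List (String × String))) (lo d : Int) (hlo : 0 ≤ lo) :
    ∀ (m : Nat) (e : Int), (e - lo).toNat = m → e < (events.length : Int) →
      pvScanA events (PySem.List.pyRange e lo (-1)) d
        = (((pvSwitches events).filter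
            (fun j => decide (lo < j) && decide (j ≤ e))).getLast?).getD d := by
  intro m
  induction m with
  | zero =>
    intro e hm he
    have hel : e ≤ lo := by omega
    rw [PySem.List.pyRange_neg_one_eq_nil hel]
    have : ((pvSwitches events).filter (fun j => decide (lo < j) && decide (j ≤ e))) = [] := by
      rw [List.filter_eq_nil_iff]; intro j _ h
      simp only [Bool.and_eq_true, decide_eq_true_eq] at h; omega
    rw [this]; simp [pvScanA]
  | succ k ih =>
    intro e hm he
    have hlt : lo < e := by omega
    rw [PySem.List.pyRange_neg_one_cons hlt]
    have h0e : 0 ≤ e := le_trans hlo (le_of_lt hlt)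
    have hget : PySem.List.pyGet? events e = some events[e.toNat] :=
      PySem.List.pyGet?_eq_some_getElem events h0e he
    by_cases hsw : pvTypeOf events[e.toNat] = some "app_switch"
    · have hmem : e ∈ pvSwitches events := by
        rw [pv_mem_switches]
        exact ⟨e.toNat, by omega, by omega, hsw⟩
      have hlast := pv_getLast_filter (fun j => decide (lo < j) && decide (j ≤ e))
        (pvSwitches events) (pv_switches_sorted events) e hmem
        (by simp only [Bool.and_eq_true, decide_eq_true_eq]; omega)
        (by intro j h; simp only [Bool.and_eq_true, decide_eq_true_eq] at h; omega)
      simp only [pvScanA, hget, hsw, hlast, if_true, Option.getD_some]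
    · have hfe : ((pvSwitches events).filter (fun j => decide (lo < j) && decide (j ≤ e)))
          = ((pvSwitches events).filter (fun j => decide (lo < j) && decide (j ≤ e - 1))) := by
        apply List.filter_congr
        intro j hj
        have hje : j ≠ e := by
          rw [pv_mem_switches] at hj
          rcases hj with ⟨k', hk', rfl, hsw'⟩
          intro h
          have hkk : e.toNat = k' := by omega
          exact hsw (hkk ▸ hsw')
        have hiff : j ≤ e ↔ j ≤ e - 1 := by omega
        rw [decide_eq_decide.mpr hiff]
      have hih := ih (e - 1) (by omega) (by omega)
      rcases hg : pvTypeOf events[e.toNat] with _ | v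
      · simp only [pvScanA, hget, hg, hih, hfe]
      · have hv : ¬ v = "app_switch" := fun h => hsw (by rw [hg, h])
        simp only [pvScanA, hget, hg, if_neg hv, hih, hfe]

-- hence A's scan equals B's fold over the switch index
theorem pv_scan_eq_best (events : List (List (String × String))) (lo e : Int)
    (hlo : 0 ≤ lo) (he : e < (events.length : Int)) :
    pvScanA events (PySem.List.pyRange e lo (-1)) e = pvBestB (pvSwitches events) lo e := by
  rw [pv_scan_eq events lo e hlo (e - lo).toNat e rfl he]
  unfold pvBestB
  rw [pv_foldl_pick (fun j => lo < j ∧ j ≤ e)]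
  congr 2
  apply List.filter_congr
  intro j _
  simp

-- the accumulator loop of A equals B's cut points mapped to slices
theorem pv_loop_eq_cuts (events : List (List (String × String))) (ms : Int)
    (hms : events = [] ∨ 1 ≤ ms) :
    ∀ (fuel : Nat) (start : Int) (chunks : List (List (List (String × String)))),
      0 ≤ start →
      pvLoopA events ms fuel start chunks
        = chunks ++
          (((start :: pvCuts events ms (pvSwitches events) fuel start).zip
              (pvCuts events ms (pvSwitches events) fuel start)).map
            (fun p => PySem.List.slice events (some p.1) (some p.2))) := by
  intro fuel
  induction fuel with
  | zero => intro start chunks _; simp [pvLoopA, pvCuts]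
  | succ f ih =>
    intro start chunks hstart
    rw [pvLoopA, pvCuts]
    by_cases hin : start < (events.length : Int)
    · simp only [if_pos hin]
      have hms1 : 1 ≤ ms := hms.resolve_left (by
        intro h; rw [h] at hin; simp at hin; omega)
      set end0 := min (start + ms) (events.length : Int) with hend0
      by_cases hlt : end0 < (events.length : Int)
      · have hlo : 0 ≤ max (start + PySem.Int.floordiv ms 2) start :=
          le_trans hstart (le_max_right _ _)
        simp only [if_pos hlt]
        rw [pv_scan_eq_best events (max (start + PySem.Int.floordiv ms 2) start) end0 hlo hlt]
        set end1 := pvBestB (pvSwitches events) (max (start + PySem.Int.floordiv ms 2) start) end0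
          with hend1
        have h0e1 : 0 ≤ end1 := by
          rw [hend1]
          unfold pvBestB
          rw [pv_foldl_pick (fun j => max (start + PySem.Int.floordiv ms 2) start < j ∧ j ≤ end0)]
          rcases hg : (((pvSwitches events).filter
              (fun j => decide (max (start + PySem.Int.floordiv ms 2) start < j ∧ j ≤ end0))).getLast?) with _ | j
          · simp only [Option.getD_none]; omega
          · simp only [Option.getD_some]
            have hjmem := List.mem_of_getLast? hg
            have := (List.mem_filter.mp hjmem).2
            simp only [decide_eq_true_eq] at this
            omega
        rw [ih end1 _ h0e1, List.zip_cons_cons, List.map_cons]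
        simp
      · simp only [if_neg hlt]
        have h0e0 : 0 ≤ end0 := by omega
        rw [ih end0 _ h0e0, List.zip_cons_cons, List.map_cons]
        simp
    · simp [if_neg hin]

-- ===== VERDICT (by name: the statement is the Claim_ definition above) =====
theorem split_at_boundaries_py_spec : Claim_equal_split_at_boundaries_py := by
  intro events max_size _ hpre
  unfold Spec_split_at_boundaries_py split_at_boundaries_py split_at_boundaries_py_alt
  by_cases h : (events.length : Int) ≤ max_size
  · simp [h]
  · simp only [if_neg h]
    exact pv_loop_eq_cuts events max_size hpre (events.length + 1) 0 [] le_rfl
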